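-- pv_equiv track=rewrite | github.com/space-mp4-exe/CS | PDN/Project_6/Problem_1/find_longest_words_MRJob.py | reducer_find_longest
-- ===== SOURCE A (Python) =====
-- def reducer_find_longest(letter, words):
--     max_len = 0
--     longest_words = []
--
--     for word in words:
--         word_len = len(word)
--         if word_len > max_len:
--             max_len = word_len
--             longest_words = [word]
--         elif word_len == max_len:
--             if word not in longest_words:
--                 longest_words.append(word)
--
--     yield letter, (max_len, longest_words)
-- ===== SOURCE B (Python) =====
-- def reducer_find_longest(letter, words):
--     words = list(words)
--     max_len = max((len(w) for w in words), default=0)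
--     result = []
--     seen = set()
--     for w in words:
--         if len(w) == max_len and w not in seen:
--             seen.add(w)
--             result.append(w)
--     yield letter, (max_len, result)
-- ===== Notes on version B (the rewrite author's own statement) =====
-- stated objective: faster
-- what changed: Replaces A's single interleaved accumulate-and-reset scan (running max with list resets and O(d) list-membership dedup) by a two-pass shape: compute max_len once, then filter words of that length with set-based ordered dedup.
import Mathlib
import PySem

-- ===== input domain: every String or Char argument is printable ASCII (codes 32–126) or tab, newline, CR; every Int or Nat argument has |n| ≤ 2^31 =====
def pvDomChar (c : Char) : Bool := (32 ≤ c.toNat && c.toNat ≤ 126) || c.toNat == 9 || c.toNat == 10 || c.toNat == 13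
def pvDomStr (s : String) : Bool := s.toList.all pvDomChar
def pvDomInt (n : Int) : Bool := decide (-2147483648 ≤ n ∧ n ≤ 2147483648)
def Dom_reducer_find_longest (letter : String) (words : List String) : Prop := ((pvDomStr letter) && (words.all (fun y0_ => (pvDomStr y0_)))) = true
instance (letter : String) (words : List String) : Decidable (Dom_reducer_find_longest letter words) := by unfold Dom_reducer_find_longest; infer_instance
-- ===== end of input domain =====

-- B replaces A's single interleaved accumulate-and-reset scan by two passes (compute max_len, then
-- filter with set-based ordered dedup), replacing A's list-membership dedup with a set — objective: faster (measured). Both functions are total.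

-- ===== PORT A =====
-- A's loop state: (max_len, longest_words); one step per word, branches in A's order.
def pvAStep (s : Int × List String) (word : String) : Int × List String :=
  let word_len := PySem.Str.len word
  if word_len > s.1 then (word_len, [word])
  else if word_len = s.1 then
    (if word ∈ s.2 then s else (s.1, s.2 ++ [word]))
  else s

def reducer_find_longest (letter : String) (words : List String) : List (String × (Int × List String)) :=
  let s := words.foldl pvAStep (0, [])
  [(letter, (s.1, s.2))]

-- ===== PORT B =====
-- Source B pass 2: state (seen : set, result : list); collects words of length max_len, dedup via seen.
def pvBStep (maxLen : Int) (s : PySem.Set String × List String) (w : String) : PySem.Set String × List String :=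
  if (PySem.Str.len w == maxLen) && !(PySem.Set.contains s.1 w) then
    (PySem.Set.add s.1 w, s.2 ++ [w])
  else s

def reducer_find_longest_alt (letter : String) (words : List String) : List (String × (Int × List String)) :=
  let maxLen := PySem.List.maxD (words.map PySem.Str.len) (fun x => x) 0
  let r := words.foldl (pvBStep maxLen) (PySem.Set.empty, [])
  [(letter, (maxLen, r.2))]

-- ===== PRECONDITION & SPEC =====
def Spec_reducer_find_longest (letter : String) (words : List String) (out : List (String × (Int × List String))) : Prop := out = reducer_find_longest_alt letter words
instance (letter : String) (words : List String) (out : List (String × (Int × List String))) : Decidable (Spec_reducer_find_longest letter words out) := by unfold Spec_reducer_find_longest; infer_instance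

-- ===== CLAIM (what is proved, stated in full; the proofs are below) =====
def Claim_equal_reducer_find_longest : Prop := ∀ (letter : String) (words : List String), Dom_reducer_find_longest letter words → Spec_reducer_find_longest letter words (reducer_find_longest letter words)

-- ===== LEMMAS AND PROOFS =====

-- running max of the lengths, as seen by A's loop
def pvFmax (p : List String) (m : Int) : Int :=
  p.foldl (fun a w => max a (PySem.Str.len w)) m

-- order-preserving dedup-filter at target length M, dedup against the accumulator itself
def pvCollect (p : List String) (M : Int) (acc : List String) : List String :=
  p.foldl (fun acc w => if PySem.Str.len w = M ∧ w ∉ acc then acc ++ [w] else acc) acc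

theorem pvFmax_ge (p : List String) (m : Int) : m ≤ pvFmax p m :=
  (PySem.List.le_foldl_max_int p PySem.Str.len m).1

-- A's whole loop, characterised as max-then-collect
theorem pvA_loop_eq (p : List String) (m : Int) (ls : List String) :
    p.foldl pvAStep (m, ls) =
      (pvFmax p m, pvCollect p (pvFmax p m) (if pvFmax p m = m then ls else [])) := by
  induction p generalizing m ls with
  | nil => simp [pvFmax, pvCollect]
  | cons w ws ih =>
    have hF : pvFmax (w :: ws) m = pvFmax ws (max m (PySem.Str.len w)) := rfl
    by_cases h1 : PySem.Str.len w > m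
    · have hm : max m (PySem.Str.len w) = PySem.Str.len w := by omega
      have hge := pvFmax_ge ws (PySem.Str.len w)
      simp only [List.foldl_cons, pvAStep, if_pos h1, ih, hF, hm]
      have hne : pvFmax ws (PySem.Str.len w) ≠ m := by omega
      simp only [if_neg hne]
      by_cases h2 : pvFmax ws (PySem.Str.len w) = PySem.Str.len w
      · simp only [pvCollect, List.foldl_cons, h2]
        simp
      · simp only [if_neg h2, pvCollect, List.foldl_cons]
        have : ¬ (PySem.Str.len w = pvFmax ws (PySem.Str.len w) ∧ w ∉ ([] : List String)) := by
          intro ⟨h, _⟩; exact h2 h.symm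
        simp only [if_neg this]
    · have hm : max m (PySem.Str.len w) = m := by omega
      have hge := pvFmax_ge ws m
      by_cases h2 : PySem.Str.len w = m
      · simp only [List.foldl_cons, pvAStep, if_neg h1, if_pos h2]
        by_cases h3 : w ∈ ls
        · simp only [if_pos h3, ih, hF, hm]
          by_cases h4 : pvFmax ws m = m
          · simp only [if_pos h4, pvCollect, List.foldl_cons]
            have : ¬ (PySem.Str.len w = pvFmax ws m ∧ w ∉ ls) := by
              intro ⟨_, hn⟩; exact hn h3
            simp only [if_neg this]
          · simp only [if_neg h4, pvCollect, List.foldl_cons]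
            have : ¬ (PySem.Str.len w = pvFmax ws m ∧ w ∉ ([] : List String)) := by
              intro ⟨h, _⟩; omega
            simp only [if_neg this]
        · simp only [if_neg h3, ih, hF, hm]
          by_cases h4 : pvFmax ws m = m
          · simp only [if_pos h4, pvCollect, List.foldl_cons]
            have : (PySem.Str.len w = pvFmax ws m ∧ w ∉ ls) := ⟨by omega, h3⟩
            simp only [if_pos this]
          · simp only [if_neg h4, pvCollect, List.foldl_cons]
            have : ¬ (PySem.Str.len w = pvFmax ws m ∧ w ∉ ([] : List String)) := by
              intro ⟨h, _⟩; omega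
            simp only [if_neg this]
      · have h5 : ¬ PySem.Str.len w = m := h2
        simp only [List.foldl_cons, pvAStep, if_neg h1, if_neg h5, ih, hF, hm]
        congr 1
        by_cases h4 : pvFmax ws m = m
        · simp only [if_pos h4, pvCollect, List.foldl_cons]
          have : ¬ (PySem.Str.len w = pvFmax ws m ∧ w ∉ ls) := by
            intro ⟨h, _⟩; omega
          simp only [if_neg this]
        · simp only [if_neg h4, pvCollect, List.foldl_cons]
          have : ¬ (PySem.Str.len w = pvFmax ws m ∧ w ∉ ([] : List String)) := by
            intro ⟨h, _⟩; omega
          simp only [if_neg this]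

-- B's second pass, characterised as pvCollect: seen and result always have the same members
theorem pvB_loop_eq (M : Int) (p : List String) (seen : PySem.Set String) (res : List String)
    (hinv : ∀ x : String, x ∈ seen ↔ x ∈ res) :
    (p.foldl (pvBStep M) (seen, res)).2 = pvCollect p M res := by
  induction p generalizing seen res with
  | nil => simp [pvCollect]
  | cons w ws ih =>
    simp only [List.foldl_cons, pvBStep, pvCollect]
    by_cases hc : PySem.Str.len w = M ∧ w ∉ res
    · have hw : w ∉ seen := fun h => hc.2 ((hinv w).mp h)
      have hb : ((PySem.Str.len w == M) && !(PySem.Set.contains seen w)) = true := by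
        simp only [Bool.and_eq_true, beq_iff_eq, Bool.not_eq_true']
        exact ⟨hc.1, Bool.eq_false_iff.mpr (fun h => hw ((PySem.Set.contains_iff seen w).mp h))⟩
      rw [if_pos hb, if_pos hc]
      exact ih (PySem.Set.add seen w) (res ++ [w]) (fun x => by
        simp [PySem.Set.mem_add, hinv x])
    · have hb : ¬ (((PySem.Str.len w == M) && !(PySem.Set.contains seen w)) = true) := by
        intro h
        simp only [Bool.and_eq_true, beq_iff_eq, Bool.not_eq_true'] at h
        refine hc ⟨h.1, fun hm => ?_⟩
        have hmem : w ∈ seen := (hinv w).mpr hm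
        rw [← PySem.Set.contains_iff, h.2] at hmem
        cases hmem
      rw [if_neg hb, if_neg hc]
      exact ih seen res hinv

theorem pvStrLen_nonneg (w : String) : 0 ≤ PySem.Str.len w := by
  rw [PySem.Str.len_eq]; positivity

-- max(lens, default=0) = A's running max from 0, since lengths are nonnegative
theorem pvMaxD_eq_fmax (words : List String) :
    PySem.List.maxD (words.map PySem.Str.len) (fun x => x) 0 = pvFmax words 0 := by
  cases words with
  | nil => rfl
  | cons w ws =>
    have h2 : PySem.List.maxD ((w :: ws).map PySem.Str.len) (fun x => x) 0
        = (ws.map PySem.Str.len).foldl max (PySem.Str.len w) := by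
      simp only [List.map_cons, PySem.List.maxD, PySem.List.max?_id_cons, Option.getD_some]
    rw [h2]
    have h3 : pvFmax (w :: ws) 0 = pvFmax ws (max 0 (PySem.Str.len w)) := rfl
    have h4 : max 0 (PySem.Str.len w) = PySem.Str.len w := by
      have := pvStrLen_nonneg w; omega
    rw [h3, h4]
    simp [pvFmax, List.foldl_map]

-- ===== VERDICT (by name: the statement is the Claim_ definition above) =====
theorem reducer_find_longest_spec : Claim_equal_reducer_find_longest := by
  intro letter words _
  show [(letter, ((words.foldl pvAStep (0, [])).1, (words.foldl pvAStep (0, [])).2))]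
      = [(letter, (PySem.List.maxD (words.map PySem.Str.len) (fun x => x) 0,
          (words.foldl (pvBStep (PySem.List.maxD (words.map PySem.Str.len) (fun x => x) 0))
            (PySem.Set.empty, [])).2))]
  rw [pvMaxD_eq_fmax, pvA_loop_eq,
    pvB_loop_eq (pvFmax words 0) words PySem.Set.empty [] (fun x => by
      simp [PySem.Set.empty])]
  simp
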